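-- PySemCore.lean, part 4 of 8 (source lines 1241-1487 of 3059): List (3/4): numeral indices, xs[-1] / xs[0], comprehension-over-range indexing, s[::-1], itertools.combinations in CPython's order.
-- An excerpt: the file's own header and imports are repeated below, the enclosing namespaces are reopened, and the other parts are separate documents.
import Lean.Meta.Tactic.Simp.RegisterCommand
/-
PySem — Python-exact primitives for the program-equivalence environment (pv_equiv).

A Lean port of a Python function should compute what the Python computes on every
admitted input. Ports diverge from their Python almost always at a dozen built-ins
(negative indexing, slicing, // and % with a negative divisor, dict overwrite order,
int() parsing, stable sort, min/max ties, the whitespace/digit/case sets of str), not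
in the algorithm. This module implements exactly those built-ins with CPython's
semantics (reference: CPython 3.13), so a port can call them instead of re-inventing
them. Where Python RAISES, the primitive returns `Option` (none = the exception) and a
decidable side condition in `PySem.Raise` names the inputs on which it does not, for
the port's `Pre_`.

Core Lean plus one Lean-frontend module for the `pysem` simp-set registration (no Mathlib import): it compiles in about a minute wherever the grader runs.
Every definition is computable; the `@[simp]` lemmas and the bridge lemmas reduce the
primitives to the usual List/Int/String functions under the side condition that makes
them agree, so proofs about honest ports stay in familiar territory. String functions
are exact on the environment's stated input domain (printable ASCII); outside it the
Unicode tables are not modelled in this version.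

GRADER CODE: kernel-checked, differentially tested against CPython (tests/), trusted.
-/

/-- The `pysem` simp set: every PySem lemma (tagged at the end of PySem.lean — an attribute cannot be used in the module that
registers it), so `simp only [pysem]` / `simp [pysem, …]` tries the whole prelude book without the author knowing each name.
(This import is the one non-core dependency of this file; it costs ≈50 s of compile per container — a third tiny module would
avoid it and is the planned refinement.) -/
register_simp_attr pysem

namespace PySem
namespace List
variable {α : Type}

/-! ### Lemma pack 4 — numeral indices, xs[-1] / xs[0], comprehension-over-range indexing, s[::-1] and xs[:-1], list.index as a position, list.insert, two-accumulator loops, running max -/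

/-- xs[-2], xs[-3], … with a NUMERAL index (the '_neg_natCast' lemmas match a cast '-(k : Int)', not a numeral). -/
theorem pyGetD_neg_ofNat (xs : _root_.List α) (k : Nat) (d : α) (hk : 0 < k) (h : k ≤ xs.length) :
    pyGetD xs (-(no_index (OfNat.ofNat k) : _root_.Int)) d = xs[xs.length - k]'(by omega) :=
  pyGetD_neg_natCast xs k d hk h
theorem pyGet?_neg_ofNat (xs : _root_.List α) (k : Nat) (hk : 0 < k) (h : k ≤ xs.length) :
    pyGet? xs (-(no_index (OfNat.ofNat k) : _root_.Int)) = xs[xs.length - k]? :=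
  pyGet?_neg_natCast xs k hk h
/-- xs[:-2] / xs[-2:] … with a NUMERAL bound ≥ 2 (xs[:-1] is slice_to_neg_one = dropLast, xs[-1:] is slice_from_neg_one). -/
theorem slice_to_neg_ofNat (xs : _root_.List α) (k : Nat) (hk : 1 < k) :
    slice xs none (some (-(no_index (OfNat.ofNat k) : _root_.Int))) = xs.take (xs.length - k) :=
  slice_to_neg_natCast xs k (by omega)
theorem slice_from_neg_ofNat (xs : _root_.List α) (k : Nat) (hk : 1 < k) :
    slice xs (some (-(no_index (OfNat.ofNat k) : _root_.Int))) none = xs.drop (xs.length - k) :=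
  slice_from_neg_natCast xs k (by omega)
/-- the clamped position a negative bound -k denotes is len - k (truncated at 0), so 'slice_some_none' output normalises. -/
@[simp] theorem clampIdx_neg_natCast (n k : Nat) (hk : 0 < k) : clampIdx n (-(k : _root_.Int)) = n - k := by
  unfold clampIdx; split <;> (try split) <;> omega
@[simp] theorem clampIdx_neg_ofNat (n k : Nat) (hk : 0 < k) : clampIdx n (-(no_index (OfNat.ofNat k) : _root_.Int)) = n - k :=
  clampIdx_neg_natCast n k hk
@[simp] theorem clampIdx_neg_one (n : Nat) : clampIdx n (-1) = n - 1 := clampIdx_neg_natCast n 1 (by omega)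

/-- xs[-1] under Pre_ 'xs ≠ []' is the last element. -/
theorem pyGetD_neg_one (xs : _root_.List α) (d : α) (h : xs ≠ []) : pyGetD xs (-1) d = xs.getLast h := by
  simp [pyGetD, pyGet?_neg_one, _root_.List.getLast?_eq_some_getLast h]
@[simp] theorem pyGet?_neg_one_append_singleton (xs : _root_.List α) (x : α) : pyGet? (xs ++ [x]) (-1) = some x := by
  simp [pyGet?_neg_one]
@[simp] theorem pyGetD_neg_one_append_singleton (xs : _root_.List α) (x d : α) : pyGetD (xs ++ [x]) (-1) d = x := by
  simp [pyGetD]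
/-- xs[0] of a cons / xs[0] in general. -/
@[simp] theorem pyGetD_zero_cons (x : α) (xs : _root_.List α) (d : α) : pyGetD (x :: xs) 0 d = x := by simp [pyGetD]
theorem pyGet?_zero (xs : _root_.List α) : pyGet? xs 0 = xs[0]? := by
  rw [show (0 : _root_.Int) = ((0 : Nat) : _root_.Int) by rfl, pyGet?_natCast]
theorem pyGetD_zero (xs : _root_.List α) (d : α) : pyGetD xs 0 d = xs.getD 0 d := by
  rw [show (0 : _root_.Int) = ((0 : Nat) : _root_.Int) by rfl, pyGetD_natCast]
/-- xs[i] for 0 ≤ i < len as some-of-the-element. -/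
theorem pyGet?_eq_some_getElem (xs : _root_.List α) {i : _root_.Int} (h0 : 0 ≤ i) (h1 : i < xs.length) :
    pyGet? xs i = some (xs[i.toNat]'(by omega)) := by
  rw [pyGet?_of_nonneg xs h0, _root_.List.getElem?_eq_getElem (by omega)]

/-- [f(k) for k in range(a, b)][k] is f(a + k). -/
theorem pyGetD_map_pyRange_one {β : Type} (f : _root_.Int → β) (a b : _root_.Int) (k : Nat) (d : β) (hk : k < (b - a).toNat) :
    pyGetD ((pyRange a b 1).map f) (k : _root_.Int) d = f (a + k) := by
  simp [_root_.List.getD_eq_getElem?_getD, hk]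
/-- [f(k) for k in range(n)][k] is f(k). -/
theorem pyGetD_map_pyRange {β : Type} (f : _root_.Int → β) (n k : Nat) (d : β) (hk : k < n) :
    pyGetD ((pyRange 0 n 1).map f) (k : _root_.Int) d = f k := by
  rw [pyGetD_map_pyRange_one f 0 n k d (by omega)]; simp
/-- the same at an Int index 0 ≤ i < n (n an Int too — the usual PySem typing). -/
theorem pyGetD_map_pyRange_of_nonneg {β : Type} (f : _root_.Int → β) (n i : _root_.Int) (d : β) (h0 : 0 ≤ i) (h1 : i < n) :
    pyGetD ((pyRange 0 n 1).map f) i d = f i := by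
  obtain ⟨k, rfl⟩ := Int.eq_ofNat_of_zero_le h0
  rw [pyGetD_map_pyRange_one f 0 n k d (by omega)]; simp
theorem getElem?_map_pyRange_zero {β : Type} (f : _root_.Int → β) (n k : Nat) (hk : k < n) : ((pyRange 0 n 1).map f)[k]? = some (f k) := by
  simp [hk]

private theorem filterMap_getElem?_of_map_eq {ι β : Type} (l : _root_.List ι) (g : ι → Nat) (xs ys : _root_.List β)
    (h : l.map (fun k => xs[g k]?) = ys.map some) : l.filterMap (fun k => xs[g k]?) = ys := by
  have e : l.filterMap (fun k => xs[g k]?) = (l.map (fun k => xs[g k]?)).filterMap id := by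
    rw [_root_.List.filterMap_map]; rfl
  rw [e, h, _root_.List.filterMap_map]; simp [Function.comp_def]
/-- xs[::-1] is the reversed list. -/
theorem slice?_none_none_neg_one (xs : _root_.List α) : slice? xs none none (-1) = some xs.reverse := by
  unfold slice? sliceIndices
  have h1 : ¬ ((-1 : _root_.Int) = 0) := by decide
  have h2 : ((-1 : _root_.Int) < 0) := by decide
  have h3 : ¬ ((0 : _root_.Int) < -1) := by decide
  simp only [h1, h2, h3, ↓reduceIte, Option.some.injEq, Int.neg_neg, Int.ediv_one]
  apply filterMap_getElem?_of_map_eq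
  apply _root_.List.ext_getElem
  · simp only [_root_.List.length_map, _root_.List.length_range, _root_.List.length_reverse]; split <;> omega
  · intro k hk1 hk2
    simp only [_root_.List.length_map, _root_.List.length_range] at hk1
    have hk : k < xs.length := by simp at hk2; exact hk2
    simp only [_root_.List.getElem_map, _root_.List.getElem_range, _root_.List.getElem_reverse]
    rw [_root_.List.getElem?_eq_getElem (by omega)]; congr 2; omega
/-- xs[:-1] drops the last element (also on []: both sides []). -/
theorem slice_to_neg_one (xs : _root_.List α) : slice xs none (some (-1)) = xs.dropLast := by
  rw [show (-1 : _root_.Int) = -((1 : Nat) : _root_.Int) by rfl, slice_to_neg_natCast xs 1 (by omega), _root_.List.dropLast_eq_take]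
/-- xs[-1:] is the last element as a one-element list ([] on []). -/
theorem slice_from_neg_one (xs : _root_.List α) : slice xs (some (-1)) none = xs.drop (xs.length - 1) := by
  rw [show (-1 : _root_.Int) = -((1 : Nat) : _root_.Int) by rfl, slice_from_neg_natCast xs 1 (by omega)]
/-- xs[1:] is the tail. -/
theorem slice_from_one (xs : _root_.List α) : slice xs (some 1) none = xs.tail := by
  rw [show (1 : _root_.Int) = ((1 : Nat) : _root_.Int) by rfl, slice_from_natCast, _root_.List.drop_one]

/-- xs.index(v) == k as a split of the list: xs = pre ++ v :: suf with v ∉ pre and len(pre) = k. (Like every index? lemma: rw it BEFORE a plain simp —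
@[simp] index?_eq_idxOf? turns index? into core's idxOf? first.) -/
theorem index?_eq_some_iff [BEq α] [LawfulBEq α] (xs : _root_.List α) (v : α) (k : Nat) :
    index? xs v = some k ↔ ∃ pre suf, xs = pre ++ v :: suf ∧ pre.length = k ∧ v ∉ pre := by
  induction xs generalizing k with
  | nil =>
    simp [index?]
  | cons x t ih =>
    by_cases hx : x = v
    · subst hx
      rw [index?_cons_self]
      constructor
      · intro h; cases h; exact ⟨[], t, rfl, rfl, by simp⟩
      · rintro ⟨pre, suf, he, hl, hn⟩
        cases pre with
        | nil => simpa using hl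
        | cons p pre' => exfalso; have : p = x := by simpa using (congrArg _root_.List.head? he).symm
                         exact hn (by simp [this])
    · rw [index?_cons_of_ne t hx]
      constructor
      · intro h
        obtain ⟨k', hk', rfl⟩ := Option.map_eq_some_iff.mp h
        obtain ⟨pre, suf, he, hl, hn⟩ := (ih k').mp hk'
        exact ⟨x :: pre, suf, by simp [he], by simp [hl], by simp only [_root_.List.mem_cons, not_or]; exact ⟨fun e => hx e.symm, hn⟩⟩
      · rintro ⟨pre, suf, he, hl, hn⟩
        cases pre with
        | nil => exfalso; exact hx (by simpa using (congrArg _root_.List.head? he))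
        | cons p pre' =>
          have hp : p = x := by simpa using (congrArg _root_.List.head? he).symm
          subst hp
          have ht : t = pre' ++ v :: suf := by simpa using congrArg _root_.List.tail he
          rw [Option.map_eq_some_iff]
          refine ⟨pre'.length, (ih _).mpr ⟨pre', suf, ht, rfl, fun hm => hn (_root_.List.mem_cons_of_mem _ hm)⟩, ?_⟩
          simpa using hl
/-- xs.index(v) == k read positionally: v sits at position k and nowhere before it. -/
theorem getElem_of_index?_eq_some [BEq α] [LawfulBEq α] {xs : _root_.List α} {v : α} {k : Nat} (h : index? xs v = some k) :
    ∃ (hk : k < xs.length), xs[k] = v ∧ ∀ (j : Nat) (hj : j < k), xs[j] ≠ v := by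
  simp only [index?, _root_.List.idxOf?, _root_.List.findIdx?_eq_some_iff_getElem, beq_iff_eq] at h
  obtain ⟨hk, h1, h2⟩ := h; exact ⟨hk, h1, fun j hj => by simpa using h2 j hj⟩
/-- xs.index(v) for a v in the first part ignores the rest. -/
theorem index?_append_of_mem [BEq α] [LawfulBEq α] {l : _root_.List α} (t : _root_.List α) {v : α} (h : v ∈ l) : index? (l ++ t) v = index? l v := by
  induction l with
  | nil => simp at h
  | cons x u ih =>
    by_cases hx : x = v
    · subst hx; rw [_root_.List.cons_append, index?_cons_self, index?_cons_self]
    · have hv : v ∈ u := by simpa [Ne.symm hx] using h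
      rw [_root_.List.cons_append, index?_cons_of_ne _ hx, index?_cons_of_ne _ hx, ih hv]

private theorem insert_natCast' (l : _root_.List α) (p : Nat) (a : α) : insert l (p : _root_.Int) a = l.take p ++ a :: l.drop p := by
  simp only [insert, sliceIndices]
  have h1 : ¬ ((1 : _root_.Int) < 0) := by decide
  have h2 : ¬ ((p : _root_.Int) < 0) := by omega
  simp only [h1, h2, ↓reduceIte]
  by_cases hp : p ≤ l.length
  · rw [show min (p : _root_.Int) (l.length : _root_.Int) = p by omega]; simp
  · rw [show min (p : _root_.Int) (l.length : _root_.Int) = l.length by omega]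
    have hp' : l.length ≤ p := by omega
    simp [_root_.List.take_of_length_le hp', _root_.List.drop_of_length_le hp']
/-- xs.insert(p, a) at an in-range natural position is take/cons/drop (the bound keeps simp from unfolding an insert it cannot finish; past the end
Python appends, and so does this form — 'rw [PySem.List.insert_natCast xs p a (by omega)]'). -/
theorem insert_natCast (l : _root_.List α) (p : Nat) (a : α) (_h : p ≤ l.length) : insert l (p : _root_.Int) a = l.take p ++ a :: l.drop p :=
  insert_natCast' l p a
/-- xs.insert(2, v) … with a NUMERAL position. -/
theorem insert_ofNat (l : _root_.List α) (p : Nat) (a : α) (_h : p ≤ l.length) : insert l (no_index (OfNat.ofNat p) : _root_.Int) a = l.take p ++ a :: l.drop p :=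
  insert_natCast' l p a
/-- … and the length of that unfolded form (so '(insert xs i v).length' still lands on len + 1 after the unfolding). -/
@[simp high] theorem length_take_append_cons_drop (l : _root_.List α) (p : Nat) (a : α) : (l.take p ++ a :: l.drop p).length = l.length + 1 := by
  simp; omega
theorem insert_zero (l : _root_.List α) (a : α) : insert l 0 a = a :: l := by
  rw [show (0 : _root_.Int) = ((0 : Nat) : _root_.Int) by rfl, insert_natCast']; simp
theorem insert_length (l : _root_.List α) (a : α) : insert l (l.length : _root_.Int) a = l ++ [a] := by simp [insert_natCast']
theorem insert_len (l : _root_.List α) (a : α) : insert l (len l) a = l ++ [a] := by simp [insert_natCast']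

/-- two independent accumulators in one loop are two loops. -/
theorem foldl_prod_mk {β σ₁ σ₂ : Type} (f : σ₁ → β → σ₁) (g : σ₂ → β → σ₂) (l : _root_.List β) (a : σ₁) (b : σ₂) :
    l.foldl (fun s e => (f s.1 e, g s.2 e)) (a, b) = (l.foldl f a, l.foldl g b) := by
  induction l generalizing a b with
  | nil => rfl
  | cons x t ih => simp [ih]
/-- any() over equal-on-members tests. -/
theorem any_congr_mem {l : _root_.List α} {f g : α → Bool} (h : ∀ x ∈ l, f x = g x) : l.any f = l.any g := by
  induction l with
  | nil => rfl
  | cons x t ih => simp only [_root_.List.any_cons, h x _root_.List.mem_cons_self, ih (fun y hy => h y (_root_.List.mem_cons_of_mem _ hy))]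
/-- a running max bounds every term (Nat / Int). -/
theorem le_foldl_max_nat {β : Type} (xs : _root_.List β) (f : β → Nat) (init : Nat) :
    init ≤ xs.foldl (fun acc y => max acc (f y)) init ∧ ∀ x ∈ xs, f x ≤ xs.foldl (fun acc y => max acc (f y)) init := by
  induction xs generalizing init with
  | nil => simp
  | cons y t ih =>
    simp only [_root_.List.foldl_cons, _root_.List.mem_cons]
    have ⟨h1, h2⟩ := ih (max init (f y))
    exact ⟨by omega, fun x hx => hx.elim (fun e => by subst e; omega) (h2 x)⟩
theorem le_foldl_max_int {β : Type} (xs : _root_.List β) (f : β → _root_.Int) (init : _root_.Int) :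
    init ≤ xs.foldl (fun acc y => max acc (f y)) init ∧ ∀ x ∈ xs, f x ≤ xs.foldl (fun acc y => max acc (f y)) init := by
  induction xs generalizing init with
  | nil => simp
  | cons y t ih =>
    simp only [_root_.List.foldl_cons, _root_.List.mem_cons]
    have ⟨h1, h2⟩ := ih (max init (f y))
    exact ⟨by omega, fun x hx => hx.elim (fun e => by subst e; omega) (h2 x)⟩
/-- xs[i] = v at 0 ≤ i is core's set at i.toNat (both leave the list alone past the end). -/
theorem pySetD_of_nonneg (xs : _root_.List α) {i : _root_.Int} (v : α) (h : 0 ≤ i) : pySetD xs i v = xs.set i.toNat v := by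
  obtain ⟨n, rfl⟩ := Int.eq_ofNat_of_zero_le h; simp
/-- xs[a:b] for any 0 ≤ a, 0 ≤ b (past-the-end bounds clamp exactly as drop/take do). -/
theorem slice_toNat (xs : _root_.List α) {a b : _root_.Int} (ha : 0 ≤ a) (hb : 0 ≤ b) :
    slice xs (some a) (some b) = (xs.drop a.toNat).take (b.toNat - a.toNat) := by
  obtain ⟨m, rfl⟩ := Int.eq_ofNat_of_zero_le ha; obtain ⟨n, rfl⟩ := Int.eq_ofNat_of_zero_le hb
  rw [slice_natCast]; simp

/-! ### Pack 5 — itertools.combinations in CPython's order (index-lexicographic; duplicates in xs are distinct positions). -/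
/-- Python 'list(itertools.combinations(xs, r))' as lists (r a Nat; Python raises on a negative r). -/
def combinations : _root_.List α → Nat → _root_.List (_root_.List α)
  | _, 0 => [[]]
  | [], _ + 1 => []
  | x :: xs, r + 1 => (combinations xs r).map (fun c => x :: c) ++ combinations xs (r + 1)
@[simp] theorem combinations_zero (xs : _root_.List α) : combinations xs 0 = [[]] := by cases xs <;> rfl
@[simp] theorem combinations_nil_succ (r : Nat) : combinations ([] : _root_.List α) (r + 1) = [] := rfl
theorem combinations_cons_succ (x : α) (xs : _root_.List α) (r : Nat) :
    combinations (x :: xs) (r + 1) = (combinations xs r).map (fun c => x :: c) ++ combinations xs (r + 1) := rfl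
/-- the members of combinations(xs, r) are exactly the length-r sublists (order-preserving selections) of xs. -/
theorem mem_combinations_iff : ∀ (xs : _root_.List α) (r : Nat) (c : _root_.List α), c ∈ combinations xs r ↔ c.Sublist xs ∧ c.length = r
  | xs, 0, c => by
    rw [combinations_zero, _root_.List.mem_singleton]
    exact ⟨fun h => h ▸ ⟨_root_.List.nil_sublist _, rfl⟩, fun ⟨_, h⟩ => _root_.List.length_eq_zero_iff.mp h⟩
  | [], r + 1, c => by
    simp only [combinations_nil_succ, _root_.List.not_mem_nil, false_iff, not_and]
    intro hs; rw [_root_.List.sublist_nil.mp hs]; simp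
  | x :: xs, r + 1, c => by
    rw [combinations_cons_succ, _root_.List.mem_append, _root_.List.mem_map, mem_combinations_iff xs (r + 1) c]
    constructor
    · rintro (⟨c', hc', rfl⟩ | ⟨hs, hl⟩)
      · rw [mem_combinations_iff xs r c'] at hc'; exact ⟨hc'.1.cons₂ x, by simp [hc'.2]⟩
      · exact ⟨hs.cons x, hl⟩
    · rintro ⟨hs, hl⟩
      cases hs with
      | cons _ hs' => exact Or.inr ⟨hs', hl⟩
      | cons₂ _ hs' => exact Or.inl ⟨_, (mem_combinations_iff xs r _).mpr ⟨hs', by simpa using hl⟩, rfl⟩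
theorem combinations_eq_nil_of_length_lt (xs : _root_.List α) {r : Nat} (h : xs.length < r) : combinations xs r = [] := by
  apply _root_.List.eq_nil_iff_forall_not_mem.mpr; intro c hc
  obtain ⟨hs, hl⟩ := (mem_combinations_iff xs r c).mp hc
  have := hs.length_le; omega
theorem combinations_one (xs : _root_.List α) : combinations xs 1 = xs.map (fun x => [x]) := by
  induction xs with
  | nil => rfl
  | cons x t ih => rw [combinations_cons_succ, ih, combinations_zero]; rfl
@[simp] theorem combinations_length_self (xs : _root_.List α) : combinations xs xs.length = [xs] := by
  induction xs with
  | nil => rfl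
  | cons x t ih => rw [_root_.List.length_cons, combinations_cons_succ, ih, combinations_eq_nil_of_length_lt t (by omega)]; rfl
theorem length_of_mem_combinations {xs c : _root_.List α} {r : Nat} (h : c ∈ combinations xs r) : c.length = r := ((mem_combinations_iff xs r c).mp h).2
theorem sublist_of_mem_combinations {xs c : _root_.List α} {r : Nat} (h : c ∈ combinations xs r) : c.Sublist xs := ((mem_combinations_iff xs r c).mp h).1
theorem combinations_map {β : Type} (f : α → β) (xs : _root_.List α) (r : Nat) : combinations (xs.map f) r = (combinations xs r).map (_root_.List.map f) := by
  induction xs generalizing r with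
  | nil => cases r <;> rfl
  | cons x t ih => cases r with
    | zero => rfl
    | succ r => simp [combinations_cons_succ, ih, _root_.List.map_append, _root_.List.map_map, Function.comp_def]

end List
end PySem
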